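-- pv_equiv track=rewrite | github.com/FOI-Bioinformatics/neoswga | neoswga/core/dimer.py | is_dimer_fast
-- ===== SOURCE A (Python) =====
-- _DIMER_RC_TABLE = str.maketrans('ATGCatgc', 'TACGtacg')
--
-- def is_dimer_fast(seq_1, seq_2, max_dimer_bp=3):
--     """
--     Fast dimer check with early termination.
--
--     Uses optimized longest common substring with early exit once threshold exceeded.
--     ~2-3x faster than is_dimer for typical cases.
--
--     Args:
--         seq_1: First primer sequence (5' to 3')
--         seq_2: Second primer sequence (5' to 3')
--         max_dimer_bp: Maximum allowed complementary bases
--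
--     Returns:
--         True if primers may form heterodimer (binding > max_dimer_bp)
--     """
--     seq_2_rc = seq_2.translate(_DIMER_RC_TABLE)[::-1]
--
--     # Optimized LCS with early termination
--     len1, len2 = len(seq_1), len(seq_2_rc)
--     threshold = max_dimer_bp + 1  # Need > max_dimer_bp to be a dimer
--
--     # Sliding window approach with early exit
--     for offset in range(-len2 + 1, len1):
--         # Calculate overlap region
--         start1 = max(0, offset)
--         end1 = min(len1, offset + len2)
--         start2 = max(0, -offset)
--
--         # Count consecutive matches
--         run = 0
--         for i in range(end1 - start1):
--             if seq_1[start1 + i] == seq_2_rc[start2 + i]: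
--                 run += 1
--                 if run >= threshold:
--                     return True  # Early exit
--             else:
--                 run = 0
--
--     return False
-- ===== SOURCE B (Python) =====
-- _DIMER_RC_TABLE = str.maketrans('ATGCatgc', 'TACGtacg')
--
-- def is_dimer_fast(seq_1, seq_2, max_dimer_bp=3):
--     """Dimer check: hash every length-k window of the reverse complement of
--     seq_2 into a set, then test each length-k window of seq_1 for membership
--     (k = max_dimer_bp + 1, at least one matching base required)."""
--     seq_2_rc = seq_2.translate(_DIMER_RC_TABLE)[::-1]
--     k = max(max_dimer_bp + 1, 1)
--     windows = {seq_2_rc[j:j + k] for j in range(len(seq_2_rc) - k + 1)}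
--     return any(seq_1[i:i + k] in windows for i in range(len(seq_1) - k + 1))
-- ===== Notes on version B (the rewrite author's own statement) =====
-- stated objective: faster
-- what changed: Replaced A's diagonal sweep over all alignments with run-length counting by hashing every length-(max_dimer_bp+1) window of the reverse complement into a set and scanning seq_1's windows for membership.
import Mathlib
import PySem

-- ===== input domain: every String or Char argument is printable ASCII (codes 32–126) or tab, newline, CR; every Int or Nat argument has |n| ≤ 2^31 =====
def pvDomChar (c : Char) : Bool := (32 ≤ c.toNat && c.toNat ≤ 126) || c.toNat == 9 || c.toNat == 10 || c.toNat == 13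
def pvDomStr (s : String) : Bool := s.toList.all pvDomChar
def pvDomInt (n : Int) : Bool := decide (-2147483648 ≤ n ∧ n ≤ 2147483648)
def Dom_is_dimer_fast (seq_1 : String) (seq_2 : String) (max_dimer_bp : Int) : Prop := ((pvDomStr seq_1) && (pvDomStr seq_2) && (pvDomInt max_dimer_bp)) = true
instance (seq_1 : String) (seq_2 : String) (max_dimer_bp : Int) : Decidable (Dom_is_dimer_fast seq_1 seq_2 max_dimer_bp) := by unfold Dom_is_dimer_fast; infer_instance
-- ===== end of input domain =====

-- B replaces A's per-alignment diagonal sweep with run counting by a set of all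
-- length-k windows of the reverse complement, scanned against seq_1's windows.

-- ===== PORT A =====

-- str.maketrans('ATGCatgc', 'TACGtacg') applied to one character (others unchanged)
def pvRC (c : Char) : Char :=
  if c = 'A' then 'T' else if c = 'T' then 'A'
  else if c = 'G' then 'C' else if c = 'C' then 'G'
  else if c = 'a' then 't' else if c = 't' then 'a'
  else if c = 'g' then 'c' else if c = 'c' then 'g' else c

-- A's inner loop over `range(end1 - start1)` with its running `run` counter and
-- early `return True`; the Python indices are always in range here, so getD is exact
def pvRunScan (s t : List Char) (threshold : Int) : Nat → Nat → Nat → Nat → Bool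
  | 0, _, _, _ => false
  | n+1, i1, i2, run =>
    if s.getD i1 ' ' = t.getD i2 ' ' then
      if (run : Int) + 1 ≥ threshold then true
      else pvRunScan s t threshold n (i1+1) (i2+1) (run+1)
    else pvRunScan s t threshold n (i1+1) (i2+1) 0

def is_dimer_fast (seq_1 : String) (seq_2 : String) (max_dimer_bp : Int) : Bool :=
  let s := seq_1.toList
  let t := (seq_2.toList.map pvRC).reverse
  let len1 : Int := s.length
  let len2 : Int := t.length
  let threshold := max_dimer_bp + 1
  (PySem.List.pyRange (-len2 + 1) len1 1).any fun offset =>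
    let start1 := max 0 offset
    let end1 := min len1 (offset + len2)
    let start2 := max 0 (-offset)
    pvRunScan s t threshold (end1 - start1).toNat start1.toNat start2.toNat 0

-- ===== PORT B =====

def is_dimer_fast_alt (seq_1 : String) (seq_2 : String) (max_dimer_bp : Int) : Bool :=
  let s := seq_1.toList
  let t := (seq_2.toList.map pvRC).reverse
  let k := max (max_dimer_bp + 1) 1
  let windows : PySem.Set (List Char) :=
    PySem.Set.ofList (((PySem.List.pyRange 0 ((t.length : Int) - k + 1) 1)).map
      (fun j => PySem.List.slice t (some j) (some (j + k))))
  (PySem.List.pyRange 0 ((s.length : Int) - k + 1) 1).any fun i =>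
    PySem.Set.contains windows (PySem.List.slice s (some i) (some (i + k)))

-- ===== PRECONDITION & SPEC =====
def Spec_is_dimer_fast (seq_1 : String) (seq_2 : String) (max_dimer_bp : Int) (out : Bool) : Prop := out = is_dimer_fast_alt seq_1 seq_2 max_dimer_bp
instance (seq_1 : String) (seq_2 : String) (max_dimer_bp : Int) (out : Bool) : Decidable (Spec_is_dimer_fast seq_1 seq_2 max_dimer_bp out) := by unfold Spec_is_dimer_fast; infer_instance

-- ===== CLAIM (what is proved, stated in full; the proofs are below) =====
def Claim_equal_is_dimer_fast : Prop := ∀ (seq_1 : String) (seq_2 : String) (max_dimer_bp : Int), Dom_is_dimer_fast seq_1 seq_2 max_dimer_bp → Spec_is_dimer_fast seq_1 seq_2 max_dimer_bp (is_dimer_fast seq_1 seq_2 max_dimer_bp)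

-- ===== LEMMAS AND PROOFS =====

-- both programs decide this predicate: some length-k window of s coincides with one of t
def pvCommon (s t : List Char) (k : Nat) : Prop :=
  ∃ i j : Nat, i + k ≤ s.length ∧ j + k ≤ t.length ∧
    ∀ d < k, s.getD (i + d) ' ' = t.getD (j + d) ' '

lemma pvRunScan_iff (s t : List Char) (th : Int) :
    ∀ n i1 i2 run, pvRunScan s t th n i1 i2 run = true ↔
      ∃ b e : Nat, b ≤ e ∧ e < n ∧
        (∀ d, b ≤ d → d ≤ e → s.getD (i1 + d) ' ' = t.getD (i2 + d) ' ') ∧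
        (if b = 0 then (run : Int) else 0) + ((e - b : Nat) + 1) ≥ th := by
  intro n
  induction n with
  | zero =>
    intro i1 i2 run
    simp [pvRunScan]
  | succ n ih =>
    intro i1 i2 run
    rw [pvRunScan]
    by_cases h : s.getD i1 ' ' = t.getD i2 ' '
    · rw [if_pos h]
      by_cases hth : (run : Int) + 1 ≥ th
      · rw [if_pos hth]
        simp only [true_iff]
        refine ⟨0, 0, le_refl 0, Nat.succ_pos n, ?_, ?_⟩
        · intro d hd hd'
          have : d = 0 := Nat.le_antisymm hd' hd
          subst this; simpa using h
        · simpa using hth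
      · rw [if_neg hth, ih]
        constructor
        · rintro ⟨b', e', hbe, he, hm, hv⟩
          by_cases hb : b' = 0
          · subst hb
            refine ⟨0, e' + 1, Nat.zero_le _, by omega, ?_, ?_⟩
            · intro d _ hd
              rcases Nat.eq_zero_or_pos d with rfl | hdpos
              · simpa using h
              · have := hm (d - 1) (Nat.zero_le _) (by omega)
                have h1 : i1 + 1 + (d - 1) = i1 + d := by omega
                have h2 : i2 + 1 + (d - 1) = i2 + d := by omega
                rwa [h1, h2] at this
            · simp only at hv ⊢
              push_cast at hv ⊢
              omega
          · refine ⟨b' + 1, e' + 1, by omega, by omega, ?_, ?_⟩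
            · intro d hd hd'
              have := hm (d - 1) (by omega) (by omega)
              have h1 : i1 + 1 + (d - 1) = i1 + d := by omega
              have h2 : i2 + 1 + (d - 1) = i2 + d := by omega
              rwa [h1, h2] at this
            · rw [if_neg hb] at hv
              rw [if_neg (by omega : ¬ (b' + 1 = 0))]
              push_cast at hv ⊢
              omega
        · rintro ⟨b, e, hbe, he, hm, hv⟩
          by_cases hb : b = 0
          · subst hb
            simp only at hv
            have he1 : 1 ≤ e := by
              by_contra hc
              have : e = 0 := by omega
              subst this
              push_cast at hv
              omega
            refine ⟨0, e - 1, Nat.zero_le _, by omega, ?_, ?_⟩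
            · intro d hd hd'
              have := hm (d + 1) (by omega) (by omega)
              have h1 : i1 + (d + 1) = i1 + 1 + d := by omega
              have h2 : i2 + (d + 1) = i2 + 1 + d := by omega
              rwa [h1, h2] at this
            · simp only []
              push_cast at hv ⊢
              omega
          · refine ⟨b - 1, e - 1, by omega, by omega, ?_, ?_⟩
            · intro d hd hd'
              have := hm (d + 1) (by omega) (by omega)
              have h1 : i1 + (d + 1) = i1 + 1 + d := by omega
              have h2 : i2 + (d + 1) = i2 + 1 + d := by omega
              rwa [h1, h2] at this
            · rw [if_neg hb] at hv
              by_cases hb1 : b - 1 = 0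
              · rw [if_pos hb1]
                push_cast at hv ⊢
                omega
              · rw [if_neg hb1]
                omega
    · rw [if_neg h, ih]
      constructor
      · rintro ⟨b', e', hbe, he, hm, hv⟩
        refine ⟨b' + 1, e' + 1, by omega, by omega, ?_, ?_⟩
        · intro d hd hd'
          have := hm (d - 1) (by omega) (by omega)
          have h1 : i1 + 1 + (d - 1) = i1 + d := by omega
          have h2 : i2 + 1 + (d - 1) = i2 + d := by omega
          rwa [h1, h2] at this
        · rw [if_neg (by omega : ¬ (b' + 1 = 0))]
          split_ifs at hv with hb0
          · push_cast at hv ⊢; omega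
          · push_cast at hv ⊢; omega
      · rintro ⟨b, e, hbe, he, hm, hv⟩
        have hb : b ≠ 0 := by
          intro hb0; subst hb0
          exact h (hm 0 (le_refl 0) (Nat.zero_le _))
        refine ⟨b - 1, e - 1, by omega, by omega, ?_, ?_⟩
        · intro d hd hd'
          have := hm (d + 1) (by omega) (by omega)
          have h1 : i1 + (d + 1) = i1 + 1 + d := by omega
          have h2 : i2 + (d + 1) = i2 + 1 + d := by omega
          rwa [h1, h2] at this
        · rw [if_neg hb] at hv
          split_ifs with hb1
          · push_cast at hv ⊢; omega
          · omega

lemma pvScan_window (s t : List Char) (th : Int) (k : Nat) (hk : (k:Int) = max th 1)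
    (cnt a1 a2 : Nat) :
    pvRunScan s t th cnt a1 a2 0 = true ↔
      ∃ b : Nat, b + k ≤ cnt ∧ ∀ d < k, s.getD (a1 + b + d) ' ' = t.getD (a2 + b + d) ' ' := by
  rw [pvRunScan_iff]
  have hk1 : 1 ≤ k := by rcases max_cases th 1 with ⟨h1, h2⟩ | ⟨h1, h2⟩ <;> omega
  have hkth : th ≤ (k:Int) := by rcases max_cases th 1 with ⟨h1, h2⟩ | ⟨h1, h2⟩ <;> omega
  constructor
  · rintro ⟨b, e, hbe, he, hm, hv⟩
    have hv' : th ≤ ((e - b : Nat) : Int) + 1 := by split_ifs at hv <;> omega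
    have hlen : k ≤ e - b + 1 := by
      rcases max_cases th 1 with ⟨h1, h2⟩ | ⟨h1, h2⟩ <;> omega
    refine ⟨b, by omega, fun d hd => ?_⟩
    have := hm (b + d) (by omega) (by omega)
    rwa [← Nat.add_assoc, ← Nat.add_assoc] at this
  · rintro ⟨b, hb, hm⟩
    refine ⟨b, b + k - 1, by omega, by omega, fun d hd hd' => ?_, ?_⟩
    · have := hm (d - b) (by omega)
      have h1 : a1 + b + (d - b) = a1 + d := by omega
      have h2 : a2 + b + (d - b) = a2 + d := by omega
      rwa [h1, h2] at this
    · have : (b + k - 1 - b : Nat) = k - 1 := by omega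
      rw [this]
      split_ifs <;> push_cast <;> omega

lemma pvA_core (s t : List Char) (th : Int) (k : Nat) (hk : (k : Int) = max th 1) :
    ((PySem.List.pyRange (-(t.length:Int) + 1) (s.length:Int) 1).any fun o =>
       pvRunScan s t th (min (s.length:Int) (o + t.length) - max 0 o).toNat
         (max 0 o).toNat (max 0 (-o)).toNat 0) = true ↔ pvCommon s t k := by
  have hk1 : 1 ≤ k := by rcases max_cases th 1 with ⟨h1, h2⟩ | ⟨h1, h2⟩ <;> omega
  simp only [List.any_eq_true, PySem.List.mem_pyRange_one]
  constructor
  · rintro ⟨o, ⟨ho1, ho2⟩, hscan⟩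
    rw [pvScan_window s t th k hk] at hscan
    obtain ⟨b, hb, hm⟩ := hscan
    refine ⟨(max 0 o).toNat + b, (max 0 (-o)).toNat + b, ?_, ?_, hm⟩
    · rcases max_cases (0:Int) o with ⟨h1, h2⟩ | ⟨h1, h2⟩ <;>
      rcases min_cases ((s.length:Int)) (o + t.length) with ⟨h3, h4⟩ | ⟨h3, h4⟩ <;>
      omega
    · rcases max_cases (0:Int) o with ⟨h1, h2⟩ | ⟨h1, h2⟩ <;>
      rcases max_cases (0:Int) (-o) with ⟨h1', h2'⟩ | ⟨h1', h2'⟩ <;>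
      rcases min_cases ((s.length:Int)) (o + t.length) with ⟨h3, h4⟩ | ⟨h3, h4⟩ <;>
      omega
  · rintro ⟨i, j, hi, hj, hm⟩
    refine ⟨(i:Int) - j, ⟨by omega, by omega⟩, ?_⟩
    rw [pvScan_window s t th k hk]
    refine ⟨min i j, ?_, ?_⟩
    · rcases max_cases (0:Int) ((i:Int) - j) with ⟨h1, h2⟩ | ⟨h1, h2⟩ <;>
      rcases min_cases ((s.length:Int)) ((i:Int) - j + t.length) with ⟨h3, h4⟩ | ⟨h3, h4⟩ <;>
      rcases min_cases i j with ⟨h5, h6⟩ | ⟨h5, h6⟩ <;>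
      omega
    · intro d hd
      have ha1 : (max 0 ((i:Int) - j)).toNat + min i j = i := by
        rcases max_cases (0:Int) ((i:Int) - j) with ⟨h1, h2⟩ | ⟨h1, h2⟩ <;>
        rcases min_cases i j with ⟨h5, h6⟩ | ⟨h5, h6⟩ <;> omega
      have ha2 : (max 0 (-((i:Int) - j))).toNat + min i j = j := by
        rcases max_cases (0:Int) (-((i:Int) - j)) with ⟨h1, h2⟩ | ⟨h1, h2⟩ <;>
        rcases min_cases i j with ⟨h5, h6⟩ | ⟨h5, h6⟩ <;> omega
      rw [ha1, ha2]
      exact hm d hd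

lemma pv_max_toNat (m : Int) : ((max (m+1) 1).toNat : Int) = max (m+1) 1 := by
  rcases max_cases (m+1) 1 with ⟨h1, h2⟩ | ⟨h1, h2⟩ <;> omega

lemma pvA_iff (seq_1 seq_2 : String) (m : Int) :
    is_dimer_fast seq_1 seq_2 m = true ↔
      pvCommon seq_1.toList ((seq_2.toList.map pvRC).reverse) (max (m+1) 1).toNat := by
  rw [is_dimer_fast]
  exact pvA_core _ _ (m+1) _ (pv_max_toNat m)

lemma pv_take_drop_eq_iff (s t : List Char) (i j k : Nat)
    (hi : i + k ≤ s.length) (hj : j + k ≤ t.length) :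
    (s.drop i).take k = (t.drop j).take k ↔
      ∀ d < k, s.getD (i + d) ' ' = t.getD (j + d) ' ' := by
  constructor
  · intro h d hd
    have h1 : ((s.drop i).take k).getD d ' ' = ((t.drop j).take k).getD d ' ' := by rw [h]
    rw [List.getD_eq_getElem?_getD, List.getD_eq_getElem?_getD] at h1
    rw [List.getElem?_take_of_lt hd, List.getElem?_take_of_lt hd,
        List.getElem?_drop, List.getElem?_drop] at h1
    rw [List.getD_eq_getElem?_getD, List.getD_eq_getElem?_getD]
    exact h1
  · intro h
    apply List.ext_getElem
    · rw [List.length_take, List.length_take, List.length_drop, List.length_drop]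
      omega
    · intro d hd1 hd2
      rw [List.getElem_take, List.getElem_take, List.getElem_drop, List.getElem_drop]
      have hd : d < k := by rw [List.length_take, List.length_drop] at hd1; omega
      have := h d hd
      rw [List.getD_eq_getElem?_getD, List.getD_eq_getElem?_getD,
          List.getElem?_eq_getElem (by omega), List.getElem?_eq_getElem (by omega)] at this
      simpa using this

lemma pvB_iff (seq_1 seq_2 : String) (m : Int) :
    is_dimer_fast_alt seq_1 seq_2 m = true ↔
      pvCommon seq_1.toList ((seq_2.toList.map pvRC).reverse) (max (m+1) 1).toNat := by
  rw [is_dimer_fast_alt]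
  have hk := pv_max_toNat m
  set K : Int := max (m+1) 1 with hK
  set k : Nat := K.toNat with hkdef
  have hk1 : 1 ≤ k := by rcases max_cases (m+1) 1 with ⟨h1, h2⟩ | ⟨h1, h2⟩ <;> omega
  set s := seq_1.toList with hs
  set t := (seq_2.toList.map pvRC).reverse with ht
  simp only [List.any_eq_true, PySem.List.mem_pyRange_one, PySem.Set.contains]
  have hslice : ∀ (u : List Char) (a : Int), 0 ≤ a → a + K ≤ u.length →
      PySem.List.slice u (some a) (some (a + K)) = (u.drop a.toNat).take k := by
    intro u a ha hau
    rw [PySem.List.slice_toNat u ha (by omega : (0:Int) ≤ a + K)]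
    congr 1
    omega
  constructor
  · rintro ⟨i, ⟨hi0, hi1⟩, hc⟩
    have hc' : PySem.List.slice s (some i) (some (i + K)) ∈
        PySem.Set.ofList (List.map (fun j => PySem.List.slice t (some j) (some (j + K)))
          (PySem.List.pyRange 0 ((t.length : Int) - K + 1) 1)) := by
      simpa using hc
    rw [PySem.Set.mem_ofList, List.mem_map] at hc'
    obtain ⟨j, hjmem, hj⟩ := hc'
    rw [PySem.List.mem_pyRange_one] at hjmem
    obtain ⟨hj0, hj1⟩ := hjmem
    have hib : i.toNat + k ≤ s.length := by omega
    have hjb : j.toNat + k ≤ t.length := by omega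
    refine ⟨i.toNat, j.toNat, hib, hjb, ?_⟩
    rw [← pv_take_drop_eq_iff s t _ _ _ hib hjb]
    rw [← hslice s i hi0 (by omega), ← hslice t j hj0 (by omega)]
    exact hj.symm
  · rintro ⟨i, j, hi, hj, hm⟩
    refine ⟨(i : Int), ⟨by omega, by omega⟩, ?_⟩
    have : PySem.List.slice s (some (i:Int)) (some ((i:Int) + K)) ∈
        PySem.Set.ofList (List.map (fun j => PySem.List.slice t (some j) (some (j + K)))
          (PySem.List.pyRange 0 ((t.length : Int) - K + 1) 1)) := by
      rw [PySem.Set.mem_ofList, List.mem_map]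
      refine ⟨(j : Int), ?_, ?_⟩
      · rw [PySem.List.mem_pyRange_one]
        omega
      · rw [hslice s (i:Int) (by omega) (by omega), hslice t (j:Int) (by omega) (by omega)]
        simp only [Int.toNat_natCast]
        exact ((pv_take_drop_eq_iff s t _ _ _ hi hj).mpr hm).symm
    simpa using this

-- ===== VERDICT (by name: the statement is the Claim_ definition above) =====
theorem is_dimer_fast_spec : Claim_equal_is_dimer_fast := by
  intro seq_1 seq_2 m _
  unfold Spec_is_dimer_fast
  exact Bool.eq_iff_iff.mpr ((pvA_iff seq_1 seq_2 m).trans (pvB_iff seq_1 seq_2 m).symm)
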